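-- pv_equiv track=rewrite | github.com/Bobteng5/Machine-Learning-2017 | noise_eval.py | bit_representation
-- ===== SOURCE A (Python) =====
-- def bit_representation(num, n):
-- 	r = [[] for _ in range(n)]
-- 	for i in range(n):
-- 		r[i] = (num & (1 << i))
-- 		if r[i] == 0:
-- 			r[i] = -1
-- 		else:
-- 			r[i] = 1
-- 	return r
-- ===== SOURCE B (Python) =====
-- def bit_representation(num, n):
-- 	if n <= 0:
-- 		return []
-- 	s = format(num & ((1 << n) - 1), '0{}b'.format(n))
-- 	return [1 if c == '1' else -1 for c in reversed(s)]
-- ===== Notes on version B (the rewrite author's own statement) =====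
-- stated objective: faster
-- what changed: A loops over indices testing each bit with num & (1 << i); B first materialises the n low bits as one zero-padded binary string, format(num & ((1<<n)-1), '0{}b'.format(n)), then maps its characters (reversed, LSB-first) to +/-1.
import Mathlib
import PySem

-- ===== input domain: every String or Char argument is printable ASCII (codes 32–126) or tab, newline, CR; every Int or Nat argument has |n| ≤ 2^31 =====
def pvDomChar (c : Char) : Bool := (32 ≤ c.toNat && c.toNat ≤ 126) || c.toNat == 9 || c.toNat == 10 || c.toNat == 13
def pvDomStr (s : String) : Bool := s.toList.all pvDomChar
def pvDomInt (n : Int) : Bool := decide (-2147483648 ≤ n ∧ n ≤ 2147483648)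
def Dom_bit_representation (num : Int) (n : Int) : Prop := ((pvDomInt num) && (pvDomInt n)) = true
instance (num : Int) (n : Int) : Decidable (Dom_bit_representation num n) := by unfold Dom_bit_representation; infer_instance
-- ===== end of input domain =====

-- B builds the whole n-bit pattern at once as a zero-padded binary string of
-- num & ((1<<n)-1) and maps its characters (reversed) to ±1, instead of A's
-- per-index mask-and-test loop; same return value everywhere.

-- ===== PORT A =====
def bit_representation (num : Int) (n : Int) : List Int :=
  (PySem.List.pyRange 0 n 1).map (fun i =>
    let ri := PySem.Int.band num (((1 <<< i.toNat : Nat) : Int))  -- num & (1 << i)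
    if ri = 0 then -1 else 1)

-- ===== PORT B =====
-- hand port of format(m, 'b') for m ≥ 0: binary digits of m, MSB first ('0' for m = 0); exact there
def pvToBinPos (m : Nat) : List Char :=
  if m < 2 then [if m = 1 then '1' else '0']
  else pvToBinPos (m / 2) ++ [if m % 2 = 1 then '1' else '0']
termination_by m
decreasing_by omega

def bit_representation_alt (num : Int) (n : Int) : List Int :=
  if n ≤ 0 then []
  else
    -- s = format(num & ((1 << n) - 1), '0{}b'.format(n)): the masked value is ≥ 0,
    -- and its binary string zero-padded to width n (pvToBinPos plus the padding)
    let m := (PySem.Int.band num (((1 <<< n.toNat : Nat) : Int) - 1)).toNat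
    let s := List.replicate (n.toNat - (pvToBinPos m).length) '0' ++ pvToBinPos m
    s.reverse.map (fun c => if c = '1' then 1 else -1)

-- ===== PRECONDITION & SPEC =====
def Spec_bit_representation (num : Int) (n : Int) (out : List Int) : Prop := out = bit_representation_alt num n
instance (num : Int) (n : Int) (out : List Int) : Decidable (Spec_bit_representation num n out) := by unfold Spec_bit_representation; infer_instance

-- ===== CLAIM (what is proved, stated in full; the proofs are below) =====
def Claim_equal_bit_representation : Prop := ∀ (num : Int) (n : Int), Dom_bit_representation num n → Spec_bit_representation num n (bit_representation num n)

-- ===== LEMMAS AND PROOFS =====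

-- bit i of num in Python's infinite two's complement
def bitSet (num : Int) (i : Nat) : Bool :=
  if 0 ≤ num then num.toNat.testBit i else !((-num - 1).toNat.testBit i)

-- subtracting from the all-ones mask complements the low k bits
lemma pv_complement_testBit (k : Nat) : ∀ i x : Nat, i < k → x < 2 ^ k →
    (2 ^ k - 1 - x).testBit i = !x.testBit i := by
  induction k with
  | zero => intro i x hi _; omega
  | succ k ih =>
    intro i x hi hx
    have h2 : 2 ^ (k + 1) = 2 * 2 ^ k := by ring
    cases i with
    | zero =>
      rcases Nat.mod_two_eq_zero_or_one x with h | h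
      · have : (2 ^ (k + 1) - 1 - x) % 2 = 1 := by omega
        simp [Nat.testBit_zero, h, this]
      · have : (2 ^ (k + 1) - 1 - x) % 2 = 0 := by omega
        simp [Nat.testBit_zero, h, this]
    | succ i =>
      rw [Nat.testBit_add_one, Nat.testBit_add_one,
          show (2 ^ (k + 1) - 1 - x) / 2 = 2 ^ k - 1 - x / 2 from by omega]
      exact ih i (x / 2) (by omega) (by omega)

-- A's per-bit test, rewritten through bitSet
lemma pv_bit_eq (num : Int) (i : Nat) :
    (if PySem.Int.band num (((2 ^ i : Nat) : Int)) = 0 then (-1 : Int) else 1)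
      = (if bitSet num i then 1 else -1) := by
  by_cases h : 0 ≤ num
  · rw [PySem.Int.band_of_nonneg h (Int.natCast_nonneg _), Int.toNat_natCast,
        Nat.and_two_pow]
    cases hb : num.toNat.testBit i
    · simp [bitSet, h, hb]
    · have hp : (0 : Int) < ((2 ^ i : Nat) : Int) := by positivity
      simp [bitSet, h, hb]
  · have hb : (0 : Int) ≤ ((2 ^ i : Nat) : Int) := Int.natCast_nonneg _
    simp only [PySem.Int.band, if_neg h, if_pos hb, Int.toNat_natCast]
    rw [Nat.and_comm, Nat.and_two_pow]
    cases hc : (-num - 1).toNat.testBit i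
    · simp only [hc, bitSet, if_neg h]
      simp
    · simp only [hc, bitSet, if_neg h]
      simp

-- the value of the mask num & (2^k - 1)
lemma pv_mask_val (num : Int) (k : Nat) :
    (PySem.Int.band num (((2 ^ k : Nat) : Int) - 1)).toNat
      = if 0 ≤ num then num.toNat % 2 ^ k else 2 ^ k - 1 - (-num - 1).toNat % 2 ^ k := by
  have h1 : (1 : Nat) ≤ 2 ^ k := Nat.one_le_two_pow
  have hb : (0 : Int) ≤ ((2 ^ k : Nat) : Int) - 1 := by omega
  have hbt : (((2 ^ k : Nat) : Int) - 1).toNat = 2 ^ k - 1 := by omega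
  by_cases h : 0 ≤ num
  · rw [PySem.Int.band_of_nonneg h hb, hbt, Int.toNat_natCast, if_pos h,
        Nat.and_two_pow_sub_one_eq_mod]
  · simp only [PySem.Int.band, if_neg h, if_pos hb, hbt, Int.toNat_natCast]
    rw [Nat.and_comm, Nat.and_two_pow_sub_one_eq_mod]

lemma pv_mask_lt (num : Int) (k : Nat) :
    (PySem.Int.band num (((2 ^ k : Nat) : Int) - 1)).toNat < 2 ^ k := by
  rw [pv_mask_val]
  have h1 : (1 : Nat) ≤ 2 ^ k := Nat.one_le_two_pow
  have h2 : num.toNat % 2 ^ k < 2 ^ k := Nat.mod_lt _ (by omega)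
  split_ifs <;> omega

lemma pv_mask_testBit (num : Int) (k i : Nat) (hik : i < k) :
    ((PySem.Int.band num (((2 ^ k : Nat) : Int) - 1)).toNat).testBit i = bitSet num i := by
  rw [pv_mask_val]
  by_cases h : 0 ≤ num
  · simp [h, bitSet, Nat.testBit_mod_two_pow, hik]
  · rw [if_neg h,
        pv_complement_testBit k i _ hik (Nat.mod_lt _ (Nat.two_pow_pos _)),
        Nat.testBit_mod_two_pow]
    simp [bitSet, h, hik]

-- B's zero-padded binary string, reversed, lists the low k bits LSB-first
lemma pv_toBin_pad (k : Nat) : ∀ m : Nat, m < 2 ^ k → 1 ≤ k →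
    (List.replicate (k - (pvToBinPos m).length) '0' ++ pvToBinPos m).reverse
      = (List.range k).map (fun i => if m.testBit i then '1' else '0') := by
  induction k with
  | zero => intro m _ hk; omega
  | succ k ih =>
    intro m hm _
    by_cases h2 : m < 2
    · have hm0 : ∀ i, m.testBit (i + 1) = false := by
        intro i
        apply Nat.testBit_lt_two_pow
        have h21 : (2 : Nat) ≤ 2 ^ (i + 1) := by
          simpa using Nat.pow_le_pow_right (by norm_num) (Nat.succ_le_succ (Nat.zero_le i))
        omega
      rw [pvToBinPos, if_pos h2, List.range_succ_eq_map, List.map_cons, List.map_map]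
      rw [show (k + 1) - ([if m = 1 then '1' else '0'].length) = k from by simp,
          List.reverse_append, List.reverse_replicate, List.reverse_singleton,
          List.singleton_append]
      congr 1
      · interval_cases m <;> simp
      · symm
        rw [List.eq_replicate_iff]
        refine ⟨by simp, ?_⟩
        intro c hcm
        simp only [List.mem_map, List.mem_range] at hcm
        obtain ⟨i, -, rfl⟩ := hcm
        simp [Function.comp, hm0]
    · have hk1 : 1 ≤ k := by
        by_contra hk0
        have : k = 0 := by omega
        subst this; simp at hm; omega
      rw [pvToBinPos, if_neg h2]
      have hlen : (pvToBinPos (m / 2) ++ [if m % 2 = 1 then '1' else '0']).length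
          = (pvToBinPos (m / 2)).length + 1 := by simp
      rw [hlen, Nat.succ_sub_succ, ← List.append_assoc, List.reverse_append,
          List.reverse_singleton, List.singleton_append,
          ih (m / 2) (by omega) hk1,
          List.range_succ_eq_map, List.map_cons, List.map_map]
      congr 1
      · rcases Nat.mod_two_eq_zero_or_one m with h | h <;>
          simp [Nat.testBit_zero, h]
      · apply List.map_congr_left
        intro i _
        simp [Function.comp, Nat.testBit_add_one]

-- ===== VERDICT (by name: the statement is the Claim_ definition above) =====
theorem bit_representation_spec : Claim_equal_bit_representation := by
  intro num n _
  unfold Spec_bit_representation bit_representation bit_representation_alt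
  by_cases hn : n ≤ 0
  · rw [if_pos hn, PySem.List.pyRange_one,
        show (n - 0).toNat = 0 from by omega]
    simp
  · rw [if_neg hn, PySem.List.pyRange_one, show n - 0 = n from by ring]
    simp only [Nat.one_shiftLeft]
    rw [pv_toBin_pad n.toNat _ (pv_mask_lt num n.toNat) (by omega),
        List.map_map, List.map_map]
    apply List.map_congr_left
    intro i hi
    simp only [Function.comp, zero_add, Int.toNat_natCast]
    rw [pv_bit_eq]
    simp only [pv_mask_testBit num n.toNat i (List.mem_range.mp hi)]
    cases bitSet num i <;> simp
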